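-- pv_equiv track=rewrite | github.com/ravish-oo/arc-agi-opoch | equiv.py | new_partition_from_equiv
-- ===== SOURCE A (Python) =====
-- def new_partition_from_equiv(pairs: list[tuple[tuple[int, int], tuple[int, int]]]) -> dict[tuple[int, int], int]:
--     """
--     Build a partition from equivalence pairs using union-find.
--
--     Args:
--         pairs: List of ((r1, c1), (r2, c2)) pairs indicating equivalences
--
--     Returns:
--         Partition dict mapping (r, c) -> block_id
--
--     Examples:
--         >>> p = new_partition_from_equiv([((0,0), (0,1)), ((0,1), (0,2))])
--         >>> p[(0,0)] == p[(0,1)] == p[(0,2)]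
--         True
--         >>> p[(1,0)] != p[(0,0)]
--         True
--     """
--     parent: dict[tuple[int, int], tuple[int, int]] = {}
--
--     def find(pos: tuple[int, int]) -> tuple[int, int]:
--         """Find root with path compression."""
--         if pos not in parent:
--             parent[pos] = pos
--             return pos
--
--         if parent[pos] != pos:
--             parent[pos] = find(parent[pos])
--
--         return parent[pos]
--
--     def union(p1: tuple[int, int], p2: tuple[int, int]) -> None:
--         """Union two positions."""
--         root1 = find(p1)
--         root2 = find(p2)
--
--         if root1 != root2:
--             # Use lexicographic order for determinism
--             if root1 < root2:
--                 parent[root2] = root1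
--             else:
--                 parent[root1] = root2
--
--     # Process all equivalence pairs
--     for p1, p2 in pairs:
--         union(p1, p2)
--
--     # Build partition: map each position to its root
--     partition: dict[tuple[int, int], int] = {}
--     root_to_id: dict[tuple[int, int], int] = {}
--     next_id = 0
--
--     # Collect all positions
--     positions = set()
--     for p1, p2 in pairs:
--         positions.add(p1)
--         positions.add(p2)
--
--     # Assign block IDs deterministically
--     for pos in sorted(positions):
--         root = find(pos)
--         if root not in root_to_id:
--             root_to_id[root] = next_id
--             next_id += 1
--         partition[pos] = root_to_id[root]
--
--     return partition
-- ===== SOURCE B (Python) =====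
-- def new_partition_from_equiv(pairs: list[tuple[tuple[int, int], tuple[int, int]]]) -> dict[tuple[int, int], int]:
--     """Flat label-merging: keep a map pos -> current representative (the lexicographic
--     minimum of its known component); merging two components rewrites every label of the
--     larger representative to the smaller one. No parent forest, no recursion."""
--     rep: dict[tuple[int, int], tuple[int, int]] = {}
--
--     for p1, p2 in pairs:
--         r1 = rep.get(p1, p1)
--         r2 = rep.get(p2, p2)
--         if r1 != r2:
--             m, big = (r1, r2) if r1 < r2 else (r2, r1)
--             rep = {k: (m if v == big else v) for k, v in rep.items()}
--             rep[big] = m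
--
--     positions = sorted({p for pair in pairs for p in pair})
--
--     ids: dict[tuple[int, int], int] = {}
--     partition: dict[tuple[int, int], int] = {}
--     for pos in positions:
--         r = rep.get(pos, pos)
--         partition[pos] = ids.setdefault(r, len(ids))
--     return partition
-- ===== Notes on version B (the rewrite author's own statement) =====
-- stated objective: alternative
-- what changed: Replaces A's recursive union-find (parent forest, path compression, find/union) with a flat label map pos->component-minimum that merges by rewriting all labels of the larger representative in one dict comprehension, then assigns block ids with a setdefault scan.
import Mathlib
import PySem

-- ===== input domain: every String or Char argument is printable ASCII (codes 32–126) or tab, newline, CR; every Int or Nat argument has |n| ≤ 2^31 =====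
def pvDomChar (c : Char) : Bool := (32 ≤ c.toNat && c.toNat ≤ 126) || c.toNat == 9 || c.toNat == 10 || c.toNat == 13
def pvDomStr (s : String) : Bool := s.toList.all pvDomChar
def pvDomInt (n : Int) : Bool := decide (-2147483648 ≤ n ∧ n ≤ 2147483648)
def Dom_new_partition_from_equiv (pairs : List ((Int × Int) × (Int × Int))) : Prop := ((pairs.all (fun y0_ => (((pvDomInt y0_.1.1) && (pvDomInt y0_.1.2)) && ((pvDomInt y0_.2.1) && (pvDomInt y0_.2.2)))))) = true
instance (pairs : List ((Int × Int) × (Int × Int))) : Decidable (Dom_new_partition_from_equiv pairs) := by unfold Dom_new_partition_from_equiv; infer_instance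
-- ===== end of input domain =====

-- B replaces A's recursive union-find (path compression, parent forest) by a flat
-- label-rewriting merge: simpler/alternative, not claimed faster.

-- ===== PORT A =====

-- Python tuple comparison a < b (lexicographic) on pairs of ints
def pvPosLt (a b : Int × Int) : Bool := decide (a.1 < b.1) || (a.1 == b.1 && decide (a.2 < b.2))

-- find with path compression; fuel is a totality guard only (pairs.length + 1 always
-- suffices: the forest invariant bounds every parent chain by the number of unions)
def pvFindA (fuel : Nat) (parent : PySem.Dict (Int × Int) (Int × Int)) (pos : Int × Int) :
    (Int × Int) × PySem.Dict (Int × Int) (Int × Int) :=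
  match fuel with
  | 0 => (pos, parent)
  | fuel + 1 =>
    match parent.get? pos with
    | none => (pos, parent.insert pos pos)
    | some q =>
      if q ≠ pos then
        let res := pvFindA fuel parent q
        let parent2 := res.2.insert pos res.1
        (parent2.getD pos pos, parent2)
      else (parent.getD pos pos, parent)

def pvUnionA (fuel : Nat) (parent : PySem.Dict (Int × Int) (Int × Int)) (p1 p2 : Int × Int) :
    PySem.Dict (Int × Int) (Int × Int) :=
  let f1 := pvFindA fuel parent p1
  let f2 := pvFindA fuel f1.2 p2
  if f1.1 ≠ f2.1 then
    if pvPosLt f1.1 f2.1 then f2.2.insert f2.1 f1.1 else f2.2.insert f1.1 f2.1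
  else f2.2

def new_partition_from_equiv (pairs : List ((Int × Int) × (Int × Int))) : List (Int × Int × Int) :=
  let fuel := pairs.length + 1
  let parent := pairs.foldl (fun d pr => pvUnionA fuel d pr.1 pr.2) PySem.Dict.empty
  let positions : PySem.Set (Int × Int) :=
    pairs.foldl (fun s pr => PySem.Set.add (PySem.Set.add s pr.1) pr.2) PySem.Set.empty
  let st := (PySem.List.sorted2 positions Prod.fst Prod.snd).foldl
    (fun (st : PySem.Dict (Int × Int) (Int × Int) × PySem.Dict (Int × Int) Int ×
               PySem.Dict (Int × Int) Int × Int) pos =>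
      let f := pvFindA fuel st.1 pos
      let root := f.1
      let rtid := if st.2.2.1.contains root then st.2.2.1 else st.2.2.1.insert root st.2.2.2
      let next := if st.2.2.1.contains root then st.2.2.2 else st.2.2.2 + 1
      (f.2, st.2.1.insert pos (rtid.getD root 0), rtid, next))
    (parent, PySem.Dict.empty, PySem.Dict.empty, 0)
  st.2.1.items.map (fun kv => (kv.1.1, kv.1.2, kv.2))

-- ===== PORT B =====

def pvMergeB (rep : PySem.Dict (Int × Int) (Int × Int)) (p1 p2 : Int × Int) :
    PySem.Dict (Int × Int) (Int × Int) :=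
  let r1 := rep.getD p1 p1
  let r2 := rep.getD p2 p2
  if r1 ≠ r2 then
    let m := if pvPosLt r1 r2 then r1 else r2
    let big := if pvPosLt r1 r2 then r2 else r1
    let rep2 := PySem.Dict.ofList (rep.items.map (fun kv => (kv.1, if kv.2 = big then m else kv.2)))
    rep2.insert big m
  else rep

def new_partition_from_equiv_alt (pairs : List ((Int × Int) × (Int × Int))) : List (Int × Int × Int) :=
  let rep := pairs.foldl (fun r pr => pvMergeB r pr.1 pr.2) PySem.Dict.empty
  let positions := PySem.List.sorted2
    (PySem.Set.ofList (pairs.flatMap (fun pr => [pr.1, pr.2]))) Prod.fst Prod.snd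
  let st := positions.foldl
    (fun (st : PySem.Dict (Int × Int) Int × PySem.Dict (Int × Int) Int) pos =>
      let r := rep.getD pos pos
      let ids := st.1.setdefault r (st.1.size : Int)
      (ids, st.2.insert pos (ids.getD r 0)))
    (PySem.Dict.empty, PySem.Dict.empty)
  st.2.items.map (fun kv => (kv.1.1, kv.1.2, kv.2))

-- ===== PRECONDITION & SPEC =====
def Spec_new_partition_from_equiv (pairs : List ((Int × Int) × (Int × Int))) (out : List (Int × Int × Int)) : Prop := out = new_partition_from_equiv_alt pairs
instance (pairs : List ((Int × Int) × (Int × Int))) (out : List (Int × Int × Int)) : Decidable (Spec_new_partition_from_equiv pairs out) := by unfold Spec_new_partition_from_equiv; infer_instance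

-- ===== CLAIM (what is proved, stated in full; the proofs are below) =====
def Claim_equal_new_partition_from_equiv : Prop := ∀ (pairs : List ((Int × Int) × (Int × Int))), Dom_new_partition_from_equiv pairs → Spec_new_partition_from_equiv pairs (new_partition_from_equiv pairs)

-- ===== LEMMAS AND PROOFS =====

-- the parent-step function of A's forest: each node's parent (itself if absent)
def pvStep (d : PySem.Dict (Int × Int) (Int × Int)) (x : Int × Int) : Int × Int := d.getD x x

def pvIsRoot (d : PySem.Dict (Int × Int) (Int × Int)) (x : Int × Int) : Prop := pvStep d x = x

-- the root reached from x within b steps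
def pvRootF (b : Nat) (d : PySem.Dict (Int × Int) (Int × Int)) (x : Int × Int) : Int × Int :=
  (pvStep d)^[b] x

-- invariant: every chain reaches a root within b steps
def pvInv (b : Nat) (d : PySem.Dict (Int × Int) (Int × Int)) : Prop :=
  ∀ x, pvIsRoot d ((pvStep d)^[b] x)

theorem pv_iterate_root {d : PySem.Dict (Int × Int) (Int × Int)} {r : Int × Int}
    (h : pvIsRoot d r) (n : Nat) : (pvStep d)^[n] r = r := by
  induction n with
  | zero => rfl
  | succ n ih => rw [Function.iterate_succ_apply, h, ih]

theorem pv_reach_stable {d : PySem.Dict (Int × Int) (Int × Int)} {n m : Nat} {x : Int × Int}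
    (h : pvIsRoot d ((pvStep d)^[n] x)) (hnm : n ≤ m) :
    (pvStep d)^[m] x = (pvStep d)^[n] x := by
  obtain ⟨k, rfl⟩ := Nat.exists_eq_add_of_le hnm
  rw [Nat.add_comm, Function.iterate_add_apply, pv_iterate_root h]

theorem pv_root_eq_of_reach {b n : Nat} {d : PySem.Dict (Int × Int) (Int × Int)} {x : Int × Int}
    (hInv : pvInv b d) (h : pvIsRoot d ((pvStep d)^[n] x)) :
    pvRootF b d x = (pvStep d)^[n] x := by
  have h1 := pv_reach_stable h (Nat.le_max_left n b)
  have h2 := pv_reach_stable (hInv x) (Nat.le_max_right n b)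
  unfold pvRootF
  rw [← h2, ← h1]

theorem pv_inv_succ {b : Nat} {d : PySem.Dict (Int × Int) (Int × Int)} (h : pvInv b d) :
    pvInv (b + 1) d := by
  intro x
  rw [Function.iterate_succ_apply', (h x)]
  exact h x

theorem pv_rootF_succ {b : Nat} {d : PySem.Dict (Int × Int) (Int × Int)} (h : pvInv b d)
    (x : Int × Int) : pvRootF (b + 1) d x = pvRootF b d x := by
  unfold pvRootF
  rw [Function.iterate_succ_apply', (h x)]

theorem pv_step_insert (d : PySem.Dict (Int × Int) (Int × Int)) (p r x : Int × Int) :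
    pvStep (d.insert p r) x = if x = p then r else pvStep d x := by
  unfold pvStep
  rw [PySem.Dict.getD_insert]

theorem pv_isRoot_rootF {b : Nat} {d : PySem.Dict (Int × Int) (Int × Int)}
    (hInv : pvInv b d) (x : Int × Int) : pvIsRoot d (pvRootF b d x) := hInv x

-- fresh self-insert does not change the step function
theorem pv_step_insert_self {d : PySem.Dict (Int × Int) (Int × Int)} {p : Int × Int}
    (h : d.get? p = none) (x : Int × Int) : pvStep (d.insert p p) x = pvStep d x := by
  rw [pv_step_insert]
  split
  · rename_i hx; subst hx; unfold pvStep PySem.Dict.getD; rw [h]; rfl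
  · rfl

-- path compression: re-pointing p to its root changes no root and keeps the invariant
theorem pv_compress {b : Nat} {d : PySem.Dict (Int × Int) (Int × Int)} {p r : Int × Int}
    (hInv : pvInv b d) (hr : pvRootF b d p = r) (hroot : pvIsRoot d r) :
    (∀ x, pvRootF b (d.insert p r) x = pvRootF b d x) ∧ pvInv b (d.insert p r) := by
  have hroot' : pvIsRoot (d.insert p r) r := by
    by_cases hrp : r = p
    · subst hrp; unfold pvIsRoot; rw [pv_step_insert, if_pos rfl]
    · unfold pvIsRoot; rw [pv_step_insert, if_neg hrp]; exact hroot
  have aux : ∀ n x, pvIsRoot d ((pvStep d)^[n] x) →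
      (pvStep (d.insert p r))^[n] x = (pvStep d)^[n] x ∧
      pvIsRoot (d.insert p r) ((pvStep d)^[n] x) := by
    intro n
    induction n with
    | zero =>
      intro x hx
      simp only [Function.iterate_zero_apply] at hx
      refine ⟨by simp, ?_⟩
      simp only [Function.iterate_zero_apply]
      by_cases hxp : x = p
      · subst hxp
        have : pvRootF b d x = x := by
          rw [pv_root_eq_of_reach hInv (n := 0) hx, Function.iterate_zero_apply]
        rw [hr] at this
        subst this
        exact hroot'
      · unfold pvIsRoot; rw [pv_step_insert, if_neg hxp]; exact hx
    | succ n ih =>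
      intro x hx
      by_cases hxp : x = p
      · subst hxp
        have hval : (pvStep d)^[n + 1] x = r := by
          rw [← pv_root_eq_of_reach hInv hx, hr]
        rw [hval]
        refine ⟨?_, hroot'⟩
        rw [Function.iterate_succ_apply, pv_step_insert, if_pos rfl, pv_iterate_root hroot']
      · have hy : (pvStep d)^[n + 1] x = (pvStep d)^[n] (pvStep d x) :=
          Function.iterate_succ_apply _ _ _
        rw [hy] at hx ⊢
        obtain ⟨h1, h2⟩ := ih (pvStep d x) hx
        refine ⟨?_, h2⟩
        rw [Function.iterate_succ_apply, pv_step_insert, if_neg hxp, h1]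
  constructor
  · intro x
    unfold pvRootF
    exact (aux b x (hInv x)).1
  · intro x
    unfold pvInv at *
    rw [(aux b x (hInv x)).1]
    exact (aux b x (hInv x)).2

-- linking root M below root m sends every M-rooted node to m; chains grow by one step
theorem pv_link {b : Nat} {d : PySem.Dict (Int × Int) (Int × Int)} {M m : Int × Int}
    (hInv : pvInv b d) (hM : pvIsRoot d M) (hm : pvIsRoot d m) (hMm : M ≠ m) :
    (∀ x, pvRootF (b + 1) (d.insert M m) x =
      (if pvRootF b d x = M then m else pvRootF b d x)) ∧ pvInv (b + 1) (d.insert M m) := by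
  have hm' : pvIsRoot (d.insert M m) m := by
    unfold pvIsRoot; rw [pv_step_insert, if_neg (Ne.symm hMm)]; exact hm
  have hs' : ∀ s, pvIsRoot d s → s ≠ M → pvIsRoot (d.insert M m) s := by
    intro s hsr hsM; unfold pvIsRoot; rw [pv_step_insert, if_neg hsM]; exact hsr
  have aux : ∀ n x, pvIsRoot d ((pvStep d)^[n] x) →
      (pvStep (d.insert M m))^[n + 1] x =
        (if (pvStep d)^[n] x = M then m else (pvStep d)^[n] x) ∧
      pvIsRoot (d.insert M m) (if (pvStep d)^[n] x = M then m else (pvStep d)^[n] x) := by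
    intro n
    induction n with
    | zero =>
      intro x hx
      simp only [Function.iterate_zero_apply] at hx
      have hx' : pvStep d x = x := hx
      by_cases hxM : x = M
      · subst hxM
        simp only [Function.iterate_zero_apply, if_true]
        refine ⟨?_, hm'⟩
        simp only [Function.iterate_succ_apply, Function.iterate_zero_apply]
        simp [pv_step_insert]
      · simp only [Function.iterate_zero_apply, if_neg hxM]
        refine ⟨?_, hs' x hx hxM⟩
        simp only [Function.iterate_succ_apply, Function.iterate_zero_apply]
        simp [pv_step_insert, hxM, hx']
    | succ n ih =>
      intro x hx
      by_cases hxM : x = M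
      · subst hxM
        have hMn : (pvStep d)^[n + 1] x = x := pv_iterate_root hM (n + 1)
        rw [hMn, if_pos rfl]
        refine ⟨?_, hm'⟩
        rw [Function.iterate_succ_apply, pv_step_insert, if_pos rfl,
          pv_iterate_root hm' (n + 1)]
      · have hy : (pvStep d)^[n + 1] x = (pvStep d)^[n] (pvStep d x) :=
          Function.iterate_succ_apply _ _ _
        rw [hy] at hx
        rw [hy]
        obtain ⟨h1, h2⟩ := ih (pvStep d x) hx
        refine ⟨?_, h2⟩
        calc (pvStep (d.insert M m))^[n + 1 + 1] x
            = (pvStep (d.insert M m))^[n + 1] (pvStep (d.insert M m) x) :=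
              Function.iterate_succ_apply _ _ _
          _ = (pvStep (d.insert M m))^[n + 1] (pvStep d x) := by
              rw [pv_step_insert, if_neg hxM]
          _ = _ := h1
  constructor
  · intro x
    unfold pvRootF
    exact (aux b x (hInv x)).1
  · intro x
    unfold pvInv at *
    rw [(aux b x (hInv x)).1]
    exact (aux b x (hInv x)).2

-- find: returns the root, preserves all roots and the invariant
theorem pv_find_spec {b : Nat} :
    ∀ (n fuel : Nat) (d : PySem.Dict (Int × Int) (Int × Int)) (p : Int × Int),
      pvInv b d → pvIsRoot d ((pvStep d)^[n] p) → n < fuel →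
      (pvFindA fuel d p).1 = pvRootF b d p ∧
      (∀ x, pvRootF b (pvFindA fuel d p).2 x = pvRootF b d x) ∧ pvInv b (pvFindA fuel d p).2 := by
  intro n
  induction n using Nat.strong_induction_on with
  | _ n ih =>
  intro fuel d p hInv hroot hfuel
  match fuel, hfuel with
  | fuel + 1, hf =>
  cases hq : d.get? p with
  | none =>
    have hrootp : pvIsRoot d p := by
      unfold pvIsRoot pvStep PySem.Dict.getD; rw [hq]; rfl
    have hfn : pvStep (d.insert p p) = pvStep d := funext (pv_step_insert_self hq)
    have h1 : pvFindA (fuel + 1) d p = (p, d.insert p p) := by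
      simp only [pvFindA, hq]
    rw [h1]
    refine ⟨?_, ?_, ?_⟩
    · exact (pv_root_eq_of_reach hInv (n := 0) hrootp).symm
    · intro x; unfold pvRootF; rw [hfn]
    · simp only [pvInv, pvIsRoot, hfn]; exact hInv
  | some q =>
    by_cases hqp : q = p
    · subst hqp
      have hrootp : pvIsRoot d q := by
        unfold pvIsRoot pvStep PySem.Dict.getD; rw [hq]; rfl
      have h1 : pvFindA (fuel + 1) d q = (d.getD q q, d) := by
        simp only [pvFindA, hq, if_neg (by simp : ¬ (q ≠ q))]
      rw [h1]
      refine ⟨?_, fun x => rfl, hInv⟩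
      have hg : d.getD q q = q := by unfold PySem.Dict.getD; rw [hq]; rfl
      rw [hg]
      exact (pv_root_eq_of_reach hInv (n := 0) hrootp).symm
    · have hstep : pvStep d p = q := by
        unfold pvStep PySem.Dict.getD; rw [hq]; rfl
      cases n with
      | zero =>
        exfalso
        have : pvStep d p = p := hroot
        rw [hstep] at this
        exact hqp this
      | succ n' =>
        have hx : pvIsRoot d ((pvStep d)^[n'] q) := by
          have := hroot
          rwa [Function.iterate_succ_apply, hstep] at this
        obtain ⟨ha1, ha2, ha3⟩ :=
          ih n' (Nat.lt_succ_self n') fuel d q hInv hx (Nat.lt_of_succ_lt_succ hf)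
        have hpr : pvRootF b d p = pvRootF b d q := by
          rw [pv_root_eq_of_reach hInv hroot, pv_root_eq_of_reach hInv hx,
            Function.iterate_succ_apply, hstep]
        have hr' : pvRootF b (pvFindA fuel d q).2 p = (pvFindA fuel d q).1 := by
          rw [ha2 p, hpr, ha1]
        have hroot' : pvIsRoot (pvFindA fuel d q).2 (pvFindA fuel d q).1 := by
          rw [← hr']
          exact pv_isRoot_rootF ha3 p
        obtain ⟨hc1, hc2⟩ := pv_compress ha3 hr' hroot'
        have h1 : pvFindA (fuel + 1) d p =
            (((pvFindA fuel d q).2.insert p (pvFindA fuel d q).1).getD p p,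
             (pvFindA fuel d q).2.insert p (pvFindA fuel d q).1) := by
          simp only [pvFindA, hq, if_pos hqp]
        rw [h1]
        refine ⟨?_, ?_, hc2⟩
        · rw [PySem.Dict.getD_insert_self, ha1, hpr]
        · intro x; rw [hc1 x, ha2 x]

-- B's value-rewritten dict looks up as a mapped lookup of the original
theorem pv_get?_ofList_map (rep : PySem.Dict (Int × Int) (Int × Int)) (big m : Int × Int)
    (hnd : rep.keys.Nodup) (x : Int × Int) :
    (PySem.Dict.ofList (rep.items.map (fun kv => (kv.1, if kv.2 = big then m else kv.2)))).get? x
      = (rep.get? x).map (fun v => if v = big then m else v) := by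
  have hitems : (PySem.Dict.ofList
      (rep.items.map (fun kv => (kv.1, if kv.2 = big then m else kv.2)))).items
      = rep.items.map (fun kv => (kv.1, if kv.2 = big then m else kv.2)) := by
    unfold PySem.Dict.ofList PySem.Dict.update
    have := PySem.Dict.items_foldl_insert_fresh
      (l := rep.items.map (fun kv => (kv.1, if kv.2 = big then m else kv.2)))
      (k := fun a => a.1) (v := fun a => a.2) (d := PySem.Dict.empty)
      (by intro a _; simp [PySem.Dict.contains_empty])
      (by
        simp only [List.map_map]
        have : ((fun (a : (Int × Int) × (Int × Int)) => a.1) ∘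
            (fun kv : (Int × Int) × (Int × Int) => (kv.1, if kv.2 = big then m else kv.2)))
            = fun kv => kv.1 := by funext kv; rfl
        rw [this]
        exact hnd)
    simpa using this
  unfold PySem.Dict.get?
  rw [hitems]
  rw [List.find?_map]
  have hpred : ((fun p : (Int × Int) × (Int × Int) => p.1 == x) ∘
      (fun kv : (Int × Int) × (Int × Int) => (kv.1, if kv.2 = big then m else kv.2)))
      = fun p => p.1 == x := by funext kv; rfl
  rw [hpred]
  cases List.find? (fun p => p.1 == x) rep.items <;> rfl

-- lookup in B's merged dict: every big-rooted label becomes m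
theorem pv_rewrite_getD (rep : PySem.Dict (Int × Int) (Int × Int)) (hnd : rep.keys.Nodup)
    (big m x : Int × Int) (hbig : rep.getD big big = big) :
    ((PySem.Dict.ofList
        (rep.items.map (fun kv => (kv.1, if kv.2 = big then m else kv.2)))).insert big m).getD x x
      = if rep.getD x x = big then m else rep.getD x x := by
  rw [PySem.Dict.getD_insert]
  by_cases hxb : x = big
  · subst hxb
    rw [if_pos rfl, hbig, if_pos rfl]
  · rw [if_neg hxb]
    unfold PySem.Dict.getD
    rw [pv_get?_ofList_map rep big m hnd x]
    cases hgx : rep.get? x with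
    | none => simp [if_neg hxb]
    | some v => simp

-- one pair: A's union and B's merge keep the roots in lockstep
theorem pv_union_merge {b fuel : Nat} {d : PySem.Dict (Int × Int) (Int × Int)}
    {rep : PySem.Dict (Int × Int) (Int × Int)} {p1 p2 : Int × Int}
    (hfuel : b < fuel) (hInv : pvInv b d)
    (hrep : ∀ x, pvRootF b d x = rep.getD x x) (hnd : rep.keys.Nodup) :
    pvInv (b + 1) (pvUnionA fuel d p1 p2) ∧
    (∀ x, pvRootF (b + 1) (pvUnionA fuel d p1 p2) x = (pvMergeB rep p1 p2).getD x x) ∧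
    (pvMergeB rep p1 p2).keys.Nodup := by
  obtain ⟨h11, h12, h13⟩ := pv_find_spec (b := b) b fuel d p1 hInv (hInv p1) hfuel
  obtain ⟨h21, h22, h23⟩ :=
    pv_find_spec (b := b) b fuel (pvFindA fuel d p1).2 p2 h13 (h13 p2) hfuel
  have e1 : (pvFindA fuel d p1).1 = rep.getD p1 p1 := by rw [h11, hrep]
  have e2 : (pvFindA (fuel) (pvFindA fuel d p1).2 p2).1 = rep.getD p2 p2 := by
    rw [h21]; unfold pvRootF; rw [← pvRootF, h12, hrep]
  have hrootsf2 : ∀ y, pvRootF b (pvFindA fuel (pvFindA fuel d p1).2 p2).2 y = rep.getD y y := by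
    intro y; rw [h22, h12, hrep]
  have idem : ∀ y, rep.getD (rep.getD y y) (rep.getD y y) = rep.getD y y := by
    intro y
    rw [← hrep, ← hrep]
    exact pv_iterate_root (hInv y) b
  have hisroot : ∀ y, pvIsRoot (pvFindA fuel (pvFindA fuel d p1).2 p2).2 (rep.getD y y) := by
    intro y
    rw [← hrootsf2 y]
    exact pv_isRoot_rootF h23 y
  simp only [pvUnionA, pvMergeB]
  rw [e1, e2]
  by_cases hne : rep.getD p1 p1 = rep.getD p2 p2
  · have hne' : ¬(rep.getD p1 p1 ≠ rep.getD p2 p2) := by simpa using hne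
    rw [if_neg hne', if_neg hne']
    refine ⟨pv_inv_succ h23, ?_, hnd⟩
    intro x
    rw [pv_rootF_succ h23, hrootsf2]
  · have hne' : rep.getD p1 p1 ≠ rep.getD p2 p2 := hne
    rw [if_pos hne', if_pos hne']
    by_cases hlt : pvPosLt (rep.getD p1 p1) (rep.getD p2 p2) = true
    · rw [if_pos hlt, if_pos hlt, if_pos hlt]
      obtain ⟨hl1, hl2⟩ := pv_link h23 (hisroot p2) (hisroot p1) (Ne.symm hne)
      refine ⟨hl2, ?_, ?_⟩
      · intro x
        rw [hl1 x, hrootsf2 x,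
          pv_rewrite_getD rep hnd (rep.getD p2 p2) (rep.getD p1 p1) x (idem p2)]
      · exact PySem.Dict.nodup_keys_insert _ _ _ (PySem.Dict.nodup_keys_ofList _)
    · rw [if_neg hlt, if_neg hlt, if_neg hlt]
      obtain ⟨hl1, hl2⟩ := pv_link h23 (hisroot p1) (hisroot p2) hne
      refine ⟨hl2, ?_, ?_⟩
      · intro x
        rw [hl1 x, hrootsf2 x,
          pv_rewrite_getD rep hnd (rep.getD p1 p1) (rep.getD p2 p2) x (idem p1)]
      · exact PySem.Dict.nodup_keys_insert _ _ _ (PySem.Dict.nodup_keys_ofList _)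

theorem pv_phase1 :
    ∀ (ps : List ((Int × Int) × (Int × Int))) (fuel b : Nat)
      (d rep : PySem.Dict (Int × Int) (Int × Int)),
      b + ps.length < fuel → pvInv b d → (∀ x, pvRootF b d x = rep.getD x x) → rep.keys.Nodup →
      pvInv (b + ps.length) (ps.foldl (fun d pr => pvUnionA fuel d pr.1 pr.2) d) ∧
      (∀ x, pvRootF (b + ps.length) (ps.foldl (fun d pr => pvUnionA fuel d pr.1 pr.2) d) x =
        (ps.foldl (fun r pr => pvMergeB r pr.1 pr.2) rep).getD x x) ∧
      (ps.foldl (fun r pr => pvMergeB r pr.1 pr.2) rep).keys.Nodup := by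
  intro ps
  induction ps with
  | nil =>
    intro fuel b d rep _ hInv hrep hnd
    simp only [List.foldl_nil, List.length_nil, Nat.add_zero]
    exact ⟨hInv, hrep, hnd⟩
  | cons pr ps ih =>
    intro fuel b d rep hfuel hInv hrep hnd
    obtain ⟨hu1, hu2, hu3⟩ := pv_union_merge (b := b) (fuel := fuel)
      (d := d) (rep := rep) (p1 := pr.1) (p2 := pr.2) (by omega) hInv hrep hnd
    have hthis := ih fuel (b + 1) (pvUnionA fuel d pr.1 pr.2) (pvMergeB rep pr.1 pr.2)
      (by simp only [List.length_cons] at hfuel; omega) hu1 hu2 hu3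
    have e : b + (ps.length + 1) = b + 1 + ps.length := by omega
    simp only [List.foldl_cons, List.length_cons, e]
    exact hthis

-- the two position accumulations are the same list
theorem pv_positions_eq (pairs : List ((Int × Int) × (Int × Int))) :
    pairs.foldl (fun s pr => PySem.Set.add (PySem.Set.add s pr.1) pr.2) PySem.Set.empty =
    PySem.Set.ofList (pairs.flatMap (fun pr => [pr.1, pr.2])) := by
  rw [PySem.Set.ofList_eq_foldl]
  suffices h : ∀ s : PySem.Set (Int × Int),
      pairs.foldl (fun s pr => PySem.Set.add (PySem.Set.add s pr.1) pr.2) s =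
      (pairs.flatMap (fun pr => [pr.1, pr.2])).foldl PySem.Set.add s from h _
  induction pairs with
  | nil => intro s; rfl
  | cons pr ps ih => intro s; simp only [List.flatMap_cons, List.foldl_cons,
      List.foldl_append, List.foldl_cons, List.foldl_nil]; exact ih _

-- phase 2: the id-assignment folds agree
theorem pv_phase2 {b fuel : Nat} {rep : PySem.Dict (Int × Int) (Int × Int)} :
    ∀ (poss : List (Int × Int)) (d : PySem.Dict (Int × Int) (Int × Int))
      (ids part : PySem.Dict (Int × Int) Int),
      b < fuel → pvInv b d → (∀ x, pvRootF b d x = rep.getD x x) →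
      (poss.foldl
        (fun (st : PySem.Dict (Int × Int) (Int × Int) × PySem.Dict (Int × Int) Int ×
                   PySem.Dict (Int × Int) Int × Int) pos =>
          let f := pvFindA fuel st.1 pos
          let root := f.1
          let rtid := if st.2.2.1.contains root then st.2.2.1 else st.2.2.1.insert root st.2.2.2
          let next := if st.2.2.1.contains root then st.2.2.2 else st.2.2.2 + 1
          (f.2, st.2.1.insert pos (rtid.getD root 0), rtid, next))
        (d, part, ids, (ids.size : Int))).2.1 =
      (poss.foldl
        (fun (st : PySem.Dict (Int × Int) Int × PySem.Dict (Int × Int) Int) pos =>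
          let r := rep.getD pos pos
          let ids := st.1.setdefault r (st.1.size : Int)
          (ids, st.2.insert pos (ids.getD r 0)))
        (ids, part)).2 := by
  intro poss
  induction poss with
  | nil => intro d ids part _ _ _; rfl
  | cons pos poss ih =>
    intro d ids part hfuel hInv hrep
    obtain ⟨hf1, hf2, hf3⟩ := pv_find_spec (b := b) b fuel d pos hInv (hInv pos) hfuel
    have hroot : (pvFindA fuel d pos).1 = rep.getD pos pos := by rw [hf1, hrep]
    have hrep' : ∀ x, pvRootF b (pvFindA fuel d pos).2 x = rep.getD x x := by
      intro x; rw [hf2, hrep]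
    rw [List.foldl_cons, List.foldl_cons]
    by_cases hc : ids.contains (rep.getD pos pos) = true
    · have hsd : ids.setdefault (rep.getD pos pos) (ids.size : Int) = ids :=
        PySem.Dict.setdefault_of_contains ids (ids.size : Int) hc
      simp only [hroot, hsd, hc, if_true]
      exact ih _ _ _ hfuel hf3 hrep'
    · have hcf : ids.contains (rep.getD pos pos) = false := by
        cases h : ids.contains (rep.getD pos pos)
        · rfl
        · exact absurd h hc
      have hsd : ids.setdefault (rep.getD pos pos) (ids.size : Int) =
          ids.insert (rep.getD pos pos) (ids.size : Int) :=
        PySem.Dict.setdefault_of_not_contains ids (ids.size : Int) hcf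
      have hsz : (((ids.insert (rep.getD pos pos) (ids.size : Int)).size : Nat) : Int) =
          (ids.size : Int) + 1 := by
        rw [PySem.Dict.size_insert]
        rw [if_neg (by simp [hcf])]
        push_cast
        ring
      simp only [hroot, hsd, hc]
      rw [← hsz]
      exact ih _ _ _ hfuel hf3 hrep'

-- ===== VERDICT (by name: the statement is the Claim_ definition above) =====
set_option maxHeartbeats 1000000 in
theorem new_partition_from_equiv_spec : Claim_equal_new_partition_from_equiv := by
  intro pairs _
  unfold Spec_new_partition_from_equiv
  simp only [new_partition_from_equiv, new_partition_from_equiv_alt]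
  have hInv0 : pvInv 0 (PySem.Dict.empty : PySem.Dict (Int × Int) (Int × Int)) := by
    intro x
    unfold pvIsRoot pvStep
    simp [PySem.Dict.getD_empty]
  have hrep0 : ∀ x, pvRootF 0 (PySem.Dict.empty : PySem.Dict (Int × Int) (Int × Int)) x =
      (PySem.Dict.empty : PySem.Dict (Int × Int) (Int × Int)).getD x x := by
    intro x
    unfold pvRootF
    simp [PySem.Dict.getD_empty]
  obtain ⟨h1, h2, h3⟩ := pv_phase1 pairs (pairs.length + 1) 0 PySem.Dict.empty PySem.Dict.empty
    (by omega) hInv0 hrep0 (by simp)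
  rw [Nat.zero_add] at h1 h2
  rw [pv_positions_eq]
  have hmain := pv_phase2 (b := pairs.length) (fuel := pairs.length + 1)
    (PySem.List.sorted2
      (PySem.Set.ofList (pairs.flatMap (fun pr => [pr.1, pr.2]))) Prod.fst Prod.snd)
    _ PySem.Dict.empty PySem.Dict.empty
    (Nat.lt_succ_self _) h1 h2
  simp only [PySem.Dict.size_empty, Nat.cast_zero] at hmain
  rw [hmain]
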